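-- pv_equiv track=rewrite | github.com/carsongmiller/AoC2022 | 13.py | getListItems
-- ===== SOURCE A (Python) =====
-- def getListItems(expr):
-- 	items = []
-- 	parenCount = 0
-- 	i = 0
-- 	expr = expr[1:-1]
--
-- 	while i < len(expr):
-- 		if expr[i] == '[':
-- 			parenCount += 1
-- 		elif expr[i] == ']':
-- 			parenCount -= 1
-- 		elif expr[i] == ',' and parenCount == 0:
-- 			items.append(expr[:i])
-- 			expr = expr[i:].strip(',')
-- 			i = 0
-- 			continue
-- 		i += 1
--
-- 	if len(expr) > 0:
-- 		items.append(expr)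
-- 	return items
-- ===== SOURCE B (Python) =====
-- def getListItems(expr):
-- 	items = []
-- 	seg = []
-- 	depth = 0
-- 	skipping = False
-- 	for c in expr[1:-1]:
-- 		if skipping and c == ',':
-- 			continue
-- 		skipping = False
-- 		if c == '[':
-- 			depth += 1
-- 			seg.append(c)
-- 		elif c == ']':
-- 			depth -= 1
-- 			seg.append(c)
-- 		elif c == ',' and depth == 0:
-- 			items.append(''.join(seg))
-- 			seg = []
-- 			skipping = True
-- 		else:
-- 			seg.append(c)
-- 	if seg:
-- 		items.append(''.join(seg))
-- 	return items
-- ===== Notes on version B (the rewrite author's own statement) =====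
-- stated objective: faster
-- what changed: A repeatedly re-slices the string and restarts its scan index at every top-level comma (re-copying and re-scanning the remainder); B is a single left-to-right pass over the characters that accumulates the current segment and a bracket depth, never slicing or restarting.
-- intended difference: On malformed inputs whose inner text ends in commas at non-zero bracket depth while an earlier top-level comma exists, A's both-sides strip of the remainder silently drops those trailing commas from the last item (on the witness '[a,[b,]' A returns ['a', '[b']); B keeps them (B returns ['a', '[b,']), which is intended since they belong to the unterminated bracketed item. — e.g. on getListItems("[a,[b,]"): A returns ["a", "[b"], B returns ["a", "[b,"]
import Mathlib
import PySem

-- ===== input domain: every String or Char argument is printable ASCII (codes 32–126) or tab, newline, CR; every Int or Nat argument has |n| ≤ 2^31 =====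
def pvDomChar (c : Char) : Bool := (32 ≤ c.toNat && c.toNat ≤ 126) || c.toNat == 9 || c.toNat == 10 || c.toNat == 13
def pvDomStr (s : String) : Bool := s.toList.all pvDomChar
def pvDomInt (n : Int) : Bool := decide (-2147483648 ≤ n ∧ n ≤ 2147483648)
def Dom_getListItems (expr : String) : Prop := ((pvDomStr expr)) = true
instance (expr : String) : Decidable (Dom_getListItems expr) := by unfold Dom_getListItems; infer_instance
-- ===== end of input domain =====

-- B replaces A's slice-and-restart scan with a single left-to-right pass (accumulated segment + bracket depth); measured faster (no re-slicing/rescanning).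

-- the comma predicate both ports' proofs and D_ are phrased with
def isC (c : Char) : Bool := c == ','

-- ===== PORT A =====
theorem pvContains_eq : (fun c => [','].contains c) = isC := by
  funext c; by_cases h : c = ',' <;> simp [isC, h]
theorem stripChars_eq (l : List Char) :
    PySem.Chars.stripChars l [','] =
      ((List.dropWhile isC l).reverse.dropWhile isC).reverse := by
  show ((List.dropWhile (fun c => [','].contains c) (List.dropWhile (fun c => [','].contains c) l).reverse).reverse) = _
  rw [pvContains_eq]
theorem pvStripLen {l : List Char} {i : Nat} (h : i < l.length) (hc : l[i] = ',') :
    (PySem.Chars.stripChars (l.drop i) [',']).length < l.length := by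
  have h1 : l.drop i = ',' :: l.drop (i + 1) := by
    rw [List.drop_eq_getElem_cons h, hc]
  rw [stripChars_eq, h1, List.dropWhile_cons_of_pos (by decide)]
  have a1 := List.length_dropWhile_le isC ((List.dropWhile isC (l.drop (i+1))).reverse)
  have a2 := List.length_dropWhile_le isC (l.drop (i+1))
  have a3 : (l.drop (i+1)).length = l.length - (i+1) := by simp
  simp only [List.length_reverse] at a1 ⊢
  omega

-- literal port of A's while loop: state (expr, i, parenCount, items); at a top-level comma the
-- prefix expr[:i] is appended and the scan restarts at index 0 on expr[i:].strip(',')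
def aLoop (expr : List Char) (i : Nat) (pc : Int) (items : List (List Char)) : List (List Char) :=
  if h : i < expr.length then
    if expr[i] = '[' then aLoop expr (i + 1) (pc + 1) items
    else if expr[i] = ']' then aLoop expr (i + 1) (pc - 1) items
    else if hc : expr[i] = ',' ∧ pc = 0 then
      aLoop (PySem.Chars.stripChars (expr.drop i) [',']) 0 pc (items ++ [expr.take i])
    else aLoop expr (i + 1) pc items
  else if 0 < expr.length then items ++ [expr] else items
termination_by (expr.length, expr.length - i)
decreasing_by
  · exact Prod.Lex.right _ (by omega)
  · exact Prod.Lex.right _ (by omega)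
  · exact Prod.Lex.left _ _ (pvStripLen h hc.1)
  · exact Prod.Lex.right _ (by omega)

def getListItems (expr : String) : List String :=
  (aLoop (PySem.Chars.slice expr.toList (some 1) (some (-1))) 0 0 []).map String.ofList

-- ===== PORT B =====
-- literal port of B: one pass over expr[1:-1], state (depth, seg, skipping, items)
def bGo (s : List Char) (depth : Int) (seg : List Char) (skipping : Bool) (items : List (List Char)) : List (List Char) :=
  match s with
  | [] => if seg ≠ [] then items ++ [seg] else items
  | c :: t =>
    if skipping ∧ c = ',' then bGo t depth seg skipping items
    else if c = '[' then bGo t (depth + 1) (seg ++ [c]) false items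
    else if c = ']' then bGo t (depth - 1) (seg ++ [c]) false items
    else if c = ',' ∧ depth = 0 then bGo t depth [] true (items ++ [seg])
    else bGo t depth (seg ++ [c]) false items

def getListItems_alt (expr : String) : List String :=
  (bGo (PySem.Chars.slice expr.toList (some 1) (some (-1))) 0 [] false []).map String.ofList

-- ===== PRECONDITION & SPEC =====
-- input inspection D_ is phrased with: bracket balance ('[' count minus ']' count) of a list of characters
def pvDep (l : List Char) : Int := (l.count '[' : Int) - (l.count ']' : Int)

-- On malformed inputs whose inner text expr[1:-1] ends in commas sitting at non-zero bracket depth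
-- while an earlier top-level comma exists, A's both-sides strip silently deletes those trailing commas
-- from the last item; B keeps them, which is intended: they belong to the unterminated bracketed item.
def D_getListItems (expr : String) : Prop :=
  let s := (expr.toList.drop 1).dropLast
  s.getLast? = some ',' ∧ pvDep s ≠ 0 ∧
    ∃ j < s.length, s[j]? = some ',' ∧ pvDep (s.take j) = 0
instance (expr : String) : Decidable (D_getListItems expr) := by unfold D_getListItems; infer_instance

def Spec_getListItems (expr : String) (out : List String) : Prop :=
  ¬ D_getListItems expr → out = getListItems_alt expr
instance (expr : String) (out : List String) : Decidable (Spec_getListItems expr out) := by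
  unfold Spec_getListItems; infer_instance

def pvDiffWitness_getListItems : String := "[a,[b,]"
def pvDiffWitnessOut_getListItems : (List String) × (List String) := (["a", "[b"], ["a", "[b,"])

-- ===== CLAIM (what is proved, stated in full; the proofs are below) =====
def Claim_unchanged_getListItems : Prop := ∀ (expr : String), Dom_getListItems expr → Spec_getListItems expr (getListItems expr)
def Claim_exact_getListItems : Prop := ∀ (expr : String), Dom_getListItems expr → D_getListItems expr → getListItems expr ≠ getListItems_alt expr
def Claim_changed_getListItems : Prop := Dom_getListItems (pvDiffWitness_getListItems) ∧ D_getListItems (pvDiffWitness_getListItems) ∧ getListItems (pvDiffWitness_getListItems) = pvDiffWitnessOut_getListItems.1 ∧ getListItems_alt (pvDiffWitness_getListItems) = pvDiffWitnessOut_getListItems.2 ∧ pvDiffWitnessOut_getListItems.1 ≠ pvDiffWitnessOut_getListItems.2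

-- ===== LEMMAS AND PROOFS =====

-- length of the trailing comma run (proof-side only)
def pvTC (l : List Char) : Nat := (l.reverse.takeWhile isC).length

theorem pvDep_nil : pvDep [] = 0 := by simp [pvDep]

theorem pvDep_cons (c : Char) (t : List Char) :
    pvDep (c :: t) = (if c = '[' then 1 else if c = ']' then -1 else 0) + pvDep t := by
  simp only [pvDep, List.count_cons]
  split_ifs with h1 h2 <;> simp_all <;> omega

theorem pvDep_append (u v : List Char) : pvDep (u ++ v) = pvDep u + pvDep v := by
  simp only [pvDep, List.count_append]; push_cast; ring

def findTop (s : List Char) (pc : Int) : Option Nat :=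
  match s with
  | [] => none
  | c :: t =>
    if c = '[' then (findTop t (pc + 1)).map (· + 1)
    else if c = ']' then (findTop t (pc - 1)).map (· + 1)
    else if c = ',' ∧ pc = 0 then some 0
    else (findTop t pc).map (· + 1)

theorem findTop_some {s : List Char} {pc : Int} {j : Nat} (h : findTop s pc = some j) :
    j < s.length ∧ s[j]? = some ',' ∧ pc + pvDep (s.take j) = 0 := by
  induction s generalizing pc j with
  | nil => simp [findTop] at h
  | cons c t ih =>
    rw [findTop] at h
    split_ifs at h with h1 h2 h3
    · obtain ⟨j', hj', rfl⟩ := Option.map_eq_some_iff.1 h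
      obtain ⟨a, b, cdep⟩ := ih hj'
      refine ⟨by simpa using a, by simpa using b, ?_⟩
      rw [List.take_succ_cons, pvDep_cons, if_pos h1]; omega
    · obtain ⟨j', hj', rfl⟩ := Option.map_eq_some_iff.1 h
      obtain ⟨a, b, cdep⟩ := ih hj'
      refine ⟨by simpa using a, by simpa using b, ?_⟩
      rw [List.take_succ_cons, pvDep_cons, if_neg h1, if_pos h2]; omega
    · cases h
      exact ⟨by simp, by simp [h3.1], by simp [pvDep, h3.2]⟩
    · obtain ⟨j', hj', rfl⟩ := Option.map_eq_some_iff.1 h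
      obtain ⟨a, b, cdep⟩ := ih hj'
      refine ⟨by simpa using a, by simpa using b, ?_⟩
      rw [List.take_succ_cons, pvDep_cons, if_neg h1, if_neg h2]; omega

theorem findTop_append (u v : List Char) (pc : Int) :
    findTop (u ++ v) pc =
      match findTop u pc with
      | some j => some j
      | none => (findTop v (pc + pvDep u)).map (· + u.length) := by
  induction u generalizing pc with
  | nil => simp [findTop, pvDep_nil]
  | cons c t ih =>
    rw [List.cons_append, findTop, findTop, pvDep_cons]
    split_ifs with h1 h2 h3
    · rw [ih]
      cases h : findTop t (pc + 1) with
      | some j => simp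
      | none =>
        simp only [Option.map_map, List.length_cons]
        have e : pc + 1 + pvDep t = pc + (1 + pvDep t) := by omega
        rw [← e]
        congr 1
    · rw [ih]
      cases h : findTop t (pc - 1) with
      | some j => simp
      | none =>
        simp only [Option.map_map, List.length_cons]
        have e : pc - 1 + pvDep t = pc + (-1 + pvDep t) := by omega
        rw [← e]
        congr 1
    · rfl
    · rw [ih]
      cases h : findTop t pc with
      | some j => simp
      | none =>
        simp only [Option.map_map, List.length_cons]
        have e : pc + pvDep t = pc + (0 + pvDep t) := by omega
        rw [← e]
        congr 1

theorem findTop_commas (k : Nat) (pc : Int) :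
    findTop (List.replicate k ',') pc = if 0 < k ∧ pc = 0 then some 0 else none := by
  induction k with
  | zero => simp [findTop]
  | succ n ih =>
    rw [List.replicate_succ, findTop]
    split_ifs with h1 h2 h3 <;> simp_all

theorem drop_comma {s : List Char} {j : Nat} (hj : j < s.length) (hc : s[j]? = some ',') :
    s.drop j = ',' :: s.drop (j + 1) := by
  rw [List.drop_eq_getElem_cons hj]
  have hg : s[j] = ',' := by
    have h2 := List.getElem?_eq_getElem hj
    rw [h2] at hc; injection hc
  rw [hg]

theorem dropWhile_lt {s : List Char} {j : Nat} (hj : j < s.length) (hc : s[j]? = some ',') :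
    (List.dropWhile isC (s.drop j)).length < s.length := by
  rw [drop_comma hj hc, List.dropWhile_cons_of_pos (by decide)]
  have := List.length_dropWhile_le isC (s.drop (j + 1))
  simp at this ⊢; omega

def spec (s : List Char) : List (List Char) :=
  match h : findTop s 0 with
  | none => if s = [] then [] else [s]
  | some j => s.take j :: spec (List.dropWhile isC (s.drop j))
termination_by s.length
decreasing_by
  obtain ⟨hj, hc, -⟩ := findTop_some h
  exact dropWhile_lt hj hc

theorem spec_eq_none {s : List Char} (h : findTop s 0 = none) :
    spec s = if s = [] then [] else [s] := by
  rw [spec]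
  split
  · rfl
  · simp_all

theorem spec_eq_some {s : List Char} {j : Nat} (h : findTop s 0 = some j) :
    spec s = s.take j :: spec (List.dropWhile isC (s.drop j)) := by
  rw [spec]
  split
  · simp_all
  · rename_i j' hj'
    rw [h] at hj'
    cases hj'
    rfl

theorem aLoop_eq (n : Nat) : ∀ (s : List Char) (i : Nat) (pc : Int) (items : List (List Char)),
    s.length - i ≤ n → i ≤ s.length →
    aLoop s i pc items =
      match findTop (s.drop i) pc with
      | none => if 0 < s.length then items ++ [s] else items
      | some j => aLoop (PySem.Chars.stripChars (s.drop (i + j)) [',']) 0 0 (items ++ [s.take (i + j)]) := by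
  induction n with
  | zero =>
    intro s i pc items hn hi
    have hie : i = s.length := by omega
    rw [aLoop]
    rw [dif_neg (by omega)]
    rw [hie, List.drop_length]
    rfl
  | succ n ih =>
    intro s i pc items hn hi
    by_cases h : i < s.length
    · rw [aLoop, dif_pos h, List.drop_eq_getElem_cons h, findTop]
      by_cases h1 : s[i] = '['
      · rw [if_pos h1, if_pos h1, ih s (i+1) (pc+1) items (by omega) (by omega)]
        cases hf : findTop (s.drop (i+1)) (pc+1) with
        | none => simp [hf]
        | some j =>
          simp only [hf, Option.map_some]
          have e : i + (j + 1) = (i + 1) + j := by omega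
          rw [e]
      · rw [if_neg h1, if_neg h1]
        by_cases h2 : s[i] = ']'
        · rw [if_pos h2, if_pos h2, ih s (i+1) (pc-1) items (by omega) (by omega)]
          cases hf : findTop (s.drop (i+1)) (pc-1) with
          | none => simp [hf]
          | some j =>
            simp only [hf, Option.map_some]
            have e : i + (j + 1) = (i + 1) + j := by omega
            rw [e]
        · rw [if_neg h2, if_neg h2]
          by_cases h3 : s[i] = ',' ∧ pc = 0
          · rw [dif_pos h3, if_pos h3, ← List.drop_eq_getElem_cons h]
            simp only [Nat.add_zero, h3.2]
          · rw [dif_neg h3, if_neg h3, ih s (i+1) pc items (by omega) (by omega)]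
            cases hf : findTop (s.drop (i+1)) pc with
            | none => simp [hf]
            | some j =>
              simp only [hf, Option.map_some]
              have e : i + (j + 1) = (i + 1) + j := by omega
              rw [e]
    · have hie : i = s.length := by omega
      rw [aLoop, dif_neg (by omega), hie, List.drop_length]
      rfl

theorem head?_dropWhile_false {p : Char → Bool} {l : List Char} {c : Char}
    (h : (l.dropWhile p).head? = some c) : p c = false := by
  induction l with
  | nil => simp [List.dropWhile] at h
  | cons a t ih =>
    rw [List.dropWhile_cons] at h
    split_ifs at h with hp
    · exact ih h
    · cases h; simpa using hp

theorem rstrip_getLast {l : List Char} {c : Char}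
    (h : ((l.reverse.dropWhile isC).reverse).getLast? = some c) : isC c = false := by
  rw [List.getLast?_reverse] at h
  exact head?_dropWhile_false h

theorem commas_replicate {l : List Char} (h : ∀ x ∈ l, isC x = true) :
    l = List.replicate l.length ',' := by
  rw [List.eq_replicate_iff]
  exact ⟨rfl, fun b hb => by have := h b hb; simpa [isC] using this⟩

theorem rstrip_decomp (l : List Char) :
    l = (l.reverse.dropWhile isC).reverse ++ List.replicate ((l.reverse.takeWhile isC).length) ',' := by
  conv_lhs => rw [← List.reverse_reverse l, ← List.takeWhile_append_dropWhile (p := isC) (l := l.reverse)]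
  rw [List.reverse_append]
  congr 1
  have hmem : ∀ x ∈ (List.takeWhile isC l.reverse).reverse, isC x = true :=
    fun x hx => List.mem_takeWhile_imp (List.mem_reverse.1 hx)
  simpa using commas_replicate hmem

theorem rstrip_eq_self {l : List Char} (h : ∀ c, l.getLast? = some c → isC c = false) :
    (l.reverse.dropWhile isC).reverse = l := by
  cases hr : l.reverse with
  | nil => simpa using congrArg List.reverse hr
  | cons c t =>
    have hc : l.getLast? = some c := by
      rw [← List.head?_reverse, hr]; rfl
    rw [List.dropWhile_cons_of_neg (by simp [h c hc]), ← hr, List.reverse_reverse]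

theorem bGo_skip (s : List Char) (pc : Int) (seg : List Char) (items : List (List Char)) :
    bGo s pc seg true items = bGo (List.dropWhile isC s) pc seg false items := by
  induction s with
  | nil => rfl
  | cons c t ih =>
    by_cases hc : c = ','
    · rw [bGo, if_pos ⟨rfl, hc⟩, List.dropWhile_cons_of_pos (by simp [isC, hc]), ih]
    · rw [bGo, if_neg (by simp [hc]), List.dropWhile_cons_of_neg (by simp [isC, hc]), bGo,
        if_neg (show ¬(false = true ∧ c = ',') from fun h => Bool.false_ne_true h.1)]

theorem bGo_eq (s : List Char) (pc : Int) (seg : List Char) (items : List (List Char)) :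
    bGo s pc seg false items =
      match findTop s pc with
      | none => if seg ++ s = [] then items else items ++ [seg ++ s]
      | some j => bGo (List.dropWhile isC (s.drop (j + 1))) 0 [] false (items ++ [seg ++ s.take j]) := by
  induction s generalizing pc seg items with
  | nil =>
    rw [bGo, findTop]
    by_cases h : seg = [] <;> simp [h]
  | cons c t ih =>
    rw [bGo, if_neg (show ¬(false = true ∧ c = ',') from fun h => Bool.false_ne_true h.1), findTop]
    by_cases h1 : c = '['
    · rw [if_pos h1, if_pos h1, ih]
      cases hf : findTop t (pc + 1) with
      | none => simp
      | some j => simp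
    · rw [if_neg h1, if_neg h1]
      by_cases h2 : c = ']'
      · rw [if_pos h2, if_pos h2, ih]
        cases hf : findTop t (pc - 1) with
        | none => simp
        | some j => simp
      · rw [if_neg h2, if_neg h2]
        by_cases h3 : c = ',' ∧ pc = 0
        · rw [if_pos h3, if_pos h3, bGo_skip, h3.2]
          simp
        · rw [if_neg h3, if_neg h3, ih]
          cases hf : findTop t pc with
          | none => simp
          | some j => simp

theorem bGo_spec (s : List Char) : ∀ (items : List (List Char)),
    bGo s 0 [] false items = items ++ spec s := by
  induction hn : s.length using Nat.strong_induction_on generalizing s with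
  | _ n ih =>
    intro items
    rw [bGo_eq, spec]
    cases hf : findTop s 0 with
    | none =>
      by_cases h : s = [] <;> simp [h]
    | some j =>
      obtain ⟨hj, hc, -⟩ := findTop_some hf
      have hdrop : List.dropWhile isC (s.drop j) = List.dropWhile isC (s.drop (j + 1)) := by
        rw [drop_comma hj hc, List.dropWhile_cons_of_pos (by decide)]
      have hlt : (List.dropWhile isC (s.drop (j + 1))).length < n := by
        have := dropWhile_lt hj hc
        rw [hdrop] at this; omega
      simp only [hdrop]
      rw [ih _ hlt _ rfl]
      simp

theorem pvDep_commas' {l : List Char} (h : ∀ x ∈ l, isC x = true) : pvDep l = 0 := by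
  rw [commas_replicate h]
  simp [pvDep, List.count_replicate]

theorem getLast?_of_suffix {w v : List Char} (h : w <:+ v) (hw : w ≠ []) :
    w.getLast? = v.getLast? := by
  obtain ⟨x, rfl⟩ := h
  rw [List.getLast?_append]
  cases hg : w.getLast? with
  | none => exact absurd (List.getLast?_eq_none_iff.1 hg) hw
  | some c => rfl

theorem w_suffix (j : Nat) (v : List Char) : List.dropWhile isC (v.drop (j + 1)) <:+ v :=
  (List.dropWhile_suffix isC).trans (List.drop_suffix (j + 1) v)

theorem pvDep_split (v : List Char) (j : Nat) (hj : j < v.length) (hcj : v[j]? = some ',') :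
    pvDep v = pvDep (v.take j) + pvDep (List.dropWhile isC (v.drop (j + 1))) := by
  conv_lhs => rw [← List.take_append_drop j v]
  rw [pvDep_append, drop_comma hj hcj, pvDep_cons]
  conv_lhs => rw [← List.takeWhile_append_dropWhile (p := isC) (l := v.drop (j + 1))]
  rw [pvDep_append, pvDep_commas' (fun x hx => List.mem_takeWhile_imp hx)]
  simp

theorem aK : ∀ (n : Nat) (v : List Char) (k : Nat) (items : List (List Char)),
    v.length ≤ n →
    (v = [] → k = 0) →
    (∀ c, v.getLast? = some c → isC c = false) →
    (0 < k → pvDep v = 0) →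
    aLoop v 0 0 items = items ++ spec (v ++ List.replicate k ',') := by
  intro n
  induction n with
  | zero =>
    intro v k items hn h0 h1 h2
    have hv : v = [] := by cases v <;> simp_all
    subst hv
    rw [h0 rfl, aLoop]
    simp [spec, findTop]
  | succ n ih =>
    intro v k items hn h0 h1 h2
    rw [aLoop_eq v.length v 0 0 items (by omega) (by omega), List.drop_zero]
    cases hf : findTop v 0 with
    | none =>
      rcases Nat.eq_zero_or_pos k with hk | hk
      · subst hk
        rw [spec_eq_none (by simpa using hf)]
        by_cases hv : v = [] <;> simp [hv]
      · have hdep : pvDep v = 0 := h2 hk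
        have hv : v ≠ [] := fun he => absurd (h0 he) (by omega)
        rw [spec_eq_some (show findTop (v ++ List.replicate k ',') 0 = some v.length by
          rw [findTop_append, hf, findTop_commas]
          simp [hk, hdep])]
        rw [List.take_left, List.drop_left, List.dropWhile_replicate,
          if_pos (show isC ',' = true from rfl), spec_eq_none (by rfl)]
        simp [List.length_pos_iff, hv]
    | some j =>
      obtain ⟨hj, hcj, hdj⟩ := findTop_some hf
      have hdj0 : pvDep (v.take j) = 0 := by omega
      set w := List.dropWhile isC (v.drop (j + 1)) with hw
      have hsplit : List.dropWhile isC (v.drop j) = w := by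
        rw [drop_comma hj hcj, List.dropWhile_cons_of_pos (by decide)]
      have hwne : w ≠ [] := by
        intro hwe
        have hall : ∀ x ∈ v.drop (j + 1), isC x = true := List.dropWhile_eq_nil_iff.1 (hw ▸ hwe)
        rcases hd : v.drop (j + 1) with _ | ⟨c, t⟩
        · have : v.getLast? = some ',' := by
            rw [List.getLast?_eq_getElem?]
            have hlen : j = v.length - 1 := by
              have := congrArg List.length hd; simp at this; omega
            rw [← hlen]; exact hcj
          have hfalse := h1 ',' this
          simp [isC] at hfalse
        · have hsuf : v.drop (j + 1) ≠ [] := by rw [hd]; simp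
          have hlast : (v.drop (j + 1)).getLast? = v.getLast? :=
            getLast?_of_suffix (List.drop_suffix _ _) hsuf
          rcases hg : (v.drop (j+1)).getLast? with _ | c'
          · exact absurd (List.getLast?_eq_none_iff.1 hg) hsuf
          · have hmem : c' ∈ v.drop (j + 1) := List.mem_of_getLast? hg
            have hT : isC c' = true := hall _ hmem
            have hF : isC c' = false := h1 c' (by rw [← hlast]; exact hg)
            simp [hT] at hF
      have hwlast : ∀ c, w.getLast? = some c → isC c = false := by
        intro c hc
        exact h1 c ((getLast?_of_suffix (w_suffix j v) hwne) ▸ hc)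
      have hstrip : PySem.Chars.stripChars (v.drop j) [','] = w := by
        rw [stripChars_eq, hsplit, rstrip_eq_self hwlast]
      have hwlen : w.length < v.length := by
        have h4 := List.length_dropWhile_le isC (v.drop (j + 1))
        have h5 : (v.drop (j + 1)).length = v.length - (j + 1) := by simp
        rw [hw]; omega
      have hwdep : 0 < k → pvDep w = 0 := by
        intro hk
        have hs1 := pvDep_split v j hj hcj
        rw [← hw] at hs1
        have hs2 := h2 hk
        omega
      simp only [Nat.zero_add]
      rw [hstrip, ih w k _ (by omega) (fun he => absurd he hwne) hwlast hwdep]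
      rw [spec_eq_some (show findTop (v ++ List.replicate k ',') 0 = some j by
        rw [findTop_append, hf])]
      rw [List.take_append_of_le_length (by omega),
        List.drop_append_of_le_length (by omega), List.dropWhile_append, hsplit,
        if_neg (by simp [hwne])]
      simp

def DL (s : List Char) : Prop :=
  s.getLast? = some ',' ∧ pvDep s ≠ 0 ∧
    ∃ j < s.length, s[j]? = some ',' ∧ pvDep (s.take j) = 0

theorem main_lemma (s : List Char) (hD : ¬ DL s) : aLoop s 0 0 [] = spec s := by
  rw [aLoop_eq s.length s 0 0 [] (by omega) (by omega), List.drop_zero]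
  cases hf : findTop s 0 with
  | none =>
    rw [spec_eq_none hf]
    by_cases hs : s = [] <;> simp [hs, List.length_pos_iff]
  | some j =>
    obtain ⟨hj, hcj, hdj⟩ := findTop_some hf
    have hdj0 : pvDep (s.take j) = 0 := by omega
    simp only [Nat.zero_add]
    rw [spec_eq_some hf]
    set u := List.dropWhile isC (s.drop (j + 1)) with hu
    have hsplit : List.dropWhile isC (s.drop j) = u := by
      rw [drop_comma hj hcj, List.dropWhile_cons_of_pos (by decide)]
    rw [hsplit]
    by_cases hun : u = []
    · have hstrip : PySem.Chars.stripChars (s.drop j) [','] = [] := by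
        rw [stripChars_eq, hsplit, hun]; rfl
      rw [hstrip, hun, aLoop, spec_eq_none (by rfl)]
      simp
    · set v := (u.reverse.dropWhile isC).reverse with hv
      set k := pvTC u with hk
      have hdecomp : u = v ++ List.replicate k ',' := rstrip_decomp u
      have hvlast : ∀ c, v.getLast? = some c → isC c = false := fun c hc => rstrip_getLast hc
      have hstrip : PySem.Chars.stripChars (s.drop j) [','] = v := by
        rw [stripChars_eq, hsplit, hv]
      have h0' : v = [] → k = 0 := by
        intro hve
        by_contra hkne
        have hk0 : 0 < k := Nat.pos_of_ne_zero hkne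
        have hrep : u = List.replicate k ',' := by rw [hdecomp, hve]; simp
        have hhead : u.head? = some ',' := by
          rw [hrep, List.head?_replicate, if_neg (by omega)]
        have hh := head?_dropWhile_false (p := isC) (l := s.drop (j + 1)) (by rw [← hu]; exact hhead)
        simp [isC] at hh
      have h2' : 0 < k → pvDep v = 0 := by
        intro hk0
        have hvne : v ≠ [] := fun hve => absurd (h0' hve) (by omega)
        set x := s.take j ++ ',' :: List.takeWhile isC (s.drop (j + 1)) with hx
        have hs_decomp : s = x ++ (v ++ List.replicate k ',') := by
          conv_lhs => rw [← List.take_append_drop j s, drop_comma hj hcj]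
          conv_lhs => rw [← List.takeWhile_append_dropWhile (p := isC) (l := s.drop (j + 1)), ← hu]
          rw [hdecomp, hx]
          simp
        have hlast : s.getLast? = some ',' := by
          rw [hs_decomp]
          simp [List.getLast?_append, List.getLast?_replicate, show ¬ k = 0 from by omega]
        have hex : ∃ j' < s.length, s[j']? = some ',' ∧ pvDep (s.take j') = 0 := ⟨j, hj, hcj, hdj0⟩
        have hnd : pvDep s = 0 := by
          by_contra hne
          exact hD ⟨hlast, hne, hex⟩
        have hrep : pvDep (List.replicate k ',') = 0 := pvDep_commas' (fun c hc => by
          have hcc := List.eq_of_mem_replicate hc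
          simp [isC, hcc])
        rw [hs_decomp, pvDep_append, pvDep_append, pvDep_append, pvDep_cons, hdj0, hrep,
          pvDep_commas' (l := List.takeWhile isC (s.drop (j + 1)))
            (fun c hc => List.mem_takeWhile_imp hc)] at hnd
        simpa using hnd
      rw [hstrip, List.nil_append,
        aK v.length v k [s.take j] (le_refl _) h0' hvlast h2', ← hdecomp]
      simp

theorem slice_inner (l : List Char) :
    PySem.Chars.slice l (some 1) (some (-1)) = (l.drop 1).dropLast := by
  rw [PySem.Chars.slice_eq_listSlice]
  simp only [PySem.List.slice, PySem.List.clampIdx]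
  rcases l with _ | ⟨c, t⟩
  · rfl
  · simp [List.dropLast_eq_take]
    rw [if_neg (by omega)]
    omega

theorem findTop_none_no {s : List Char} {pc : Int} (h : findTop s pc = none) :
    ∀ j, j < s.length → s[j]? = some ',' → pc + pvDep (s.take j) ≠ 0 := by
  induction s generalizing pc with
  | nil => intro j hj; simp at hj
  | cons c t ih =>
    rw [findTop] at h
    intro j hj hcj
    split_ifs at h with h1 h2 h3
    · have h' : findTop t (pc + 1) = none := by
        rcases hx : findTop t (pc + 1) with _ | b
        · rfl
        · rw [hx] at h; simp at h
      cases j with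
      | zero => simp at hcj; simp [hcj] at h1
      | succ j' =>
        rw [List.take_succ_cons, pvDep_cons, if_pos h1]
        have := ih h' j' (by simpa using hj) (by simpa using hcj)
        omega
    · have h' : findTop t (pc - 1) = none := by
        rcases hx : findTop t (pc - 1) with _ | b
        · rfl
        · rw [hx] at h; simp at h
      cases j with
      | zero => simp at hcj; simp [hcj] at h2
      | succ j' =>
        rw [List.take_succ_cons, pvDep_cons, if_neg h1, if_pos h2]
        have := ih h' j' (by simpa using hj) (by simpa using hcj)
        omega
    · have h' : findTop t pc = none := by
        rcases hx : findTop t pc with _ | b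
        · rfl
        · rw [hx] at h; simp at h
      cases j with
      | zero =>
        simp at hcj
        intro hdep
        simp [List.take_zero, pvDep_nil] at hdep
        exact h3 ⟨hcj, hdep⟩
      | succ j' =>
        rw [List.take_succ_cons, pvDep_cons, if_neg h1, if_neg h2]
        have := ih h' j' (by simpa using hj) (by simpa using hcj)
        omega

theorem dropWhile_ne_nil_last {s : List Char} {j : Nat} (hj : j < s.length) (hcj : s[j]? = some ',')
    (h1 : ∀ c, s.getLast? = some c → isC c = false) :
    List.dropWhile isC (s.drop (j + 1)) ≠ [] := by
  intro hwe
  have hall : ∀ x ∈ s.drop (j + 1), isC x = true := List.dropWhile_eq_nil_iff.1 hwe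
  rcases hd : s.drop (j + 1) with _ | ⟨c, t⟩
  · have hlast : s.getLast? = some ',' := by
      rw [List.getLast?_eq_getElem?]
      have hlen : j = s.length - 1 := by
        have := congrArg List.length hd; simp at this; omega
      rw [← hlen]; exact hcj
    have hfalse := h1 ',' hlast
    simp [isC] at hfalse
  · have hsuf : s.drop (j + 1) ≠ [] := by rw [hd]; simp
    have hlast : (s.drop (j + 1)).getLast? = s.getLast? :=
      getLast?_of_suffix (List.drop_suffix _ _) hsuf
    rcases hg : (s.drop (j + 1)).getLast? with _ | c'
    · exact absurd (List.getLast?_eq_none_iff.1 hg) hsuf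
    · have hmem : c' ∈ s.drop (j + 1) := List.mem_of_getLast? hg
      have hT : isC c' = true := hall _ hmem
      have hF : isC c' = false := h1 c' (by rw [← hlast]; exact hg)
      simp [hT] at hF

theorem specT : ∀ (n : Nat) (v : List Char) (k : Nat), v.length ≤ n → 0 < k → pvDep v ≠ 0 →
    (∀ c, v.getLast? = some c → isC c = false) →
    spec v ≠ spec (v ++ List.replicate k ',') := by
  intro n
  induction n with
  | zero =>
    intro v k hn _ hdep _
    have : v = [] := by cases v <;> simp_all
    rw [this, pvDep_nil] at hdep
    exact absurd rfl hdep
  | succ n ih =>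
    intro v k hn hk hdep hvlast
    have hvne : v ≠ [] := fun he => by rw [he, pvDep_nil] at hdep; exact hdep rfl
    cases hf : findTop v 0 with
    | none =>
      rw [spec_eq_none hf,
        spec_eq_none (show findTop (v ++ List.replicate k ',') 0 = none by
          rw [findTop_append, hf, findTop_commas, if_neg (by simpa using fun _ => hdep)]
          rfl)]
      rw [if_neg hvne, if_neg (by simp [hvne])]
      intro h
      simp at h
      omega
    | some j =>
      obtain ⟨hj, hcj, hdj⟩ := findTop_some hf
      have hdj0 : pvDep (v.take j) = 0 := by omega
      have hsplit : List.dropWhile isC (v.drop j) = List.dropWhile isC (v.drop (j + 1)) := by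
        rw [drop_comma hj hcj, List.dropWhile_cons_of_pos (by decide)]
      set w := List.dropWhile isC (v.drop (j + 1)) with hw
      have hwne : w ≠ [] := dropWhile_ne_nil_last hj hcj hvlast
      rw [spec_eq_some hf, hsplit,
        spec_eq_some (show findTop (v ++ List.replicate k ',') 0 = some j by
          rw [findTop_append, hf]),
        List.take_append_of_le_length (by omega),
        List.drop_append_of_le_length (by omega),
        List.dropWhile_append, hsplit, if_neg (by simp [hwne])]
      intro h
      rw [List.cons_eq_cons] at h
      have htail := h.2
      have hwdep : pvDep w ≠ 0 := by
        have hs1 := pvDep_split v j hj hcj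
        rw [← hw] at hs1
        omega
      have hwlast : ∀ c, w.getLast? = some c → isC c = false := fun c hc =>
        hvlast c ((getLast?_of_suffix (w_suffix j v) hwne) ▸ hc)
      have hwlen : w.length < v.length := by
        have h4 := List.length_dropWhile_le isC (v.drop (j + 1))
        have h5 : (v.drop (j + 1)).length = v.length - (j + 1) := by simp
        rw [hw]; omega
      exact ih w k (by omega) hk hwdep hwlast htail

theorem tc_pos {u : List Char} (h : u.getLast? = some ',') : 0 < pvTC u := by
  unfold pvTC
  rw [← List.head?_reverse] at h
  cases hr : u.reverse with
  | nil => rw [hr] at h; simp at h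
  | cons c t =>
    rw [hr] at h
    injection h with h
    rw [List.takeWhile_cons_of_pos (by simp [isC, h])]
    simp

theorem main_ne (s : List Char) (hDL : DL s) : aLoop s 0 0 [] ≠ spec s := by
  obtain ⟨hlastS, hdepS, j', hj', hcj', hdj'⟩ := hDL
  cases hf : findTop s 0 with
  | none =>
    have := findTop_none_no hf j' hj' hcj'
    omega
  | some j =>
    obtain ⟨hj, hcj, hdj⟩ := findTop_some hf
    have hdj0 : pvDep (s.take j) = 0 := by omega
    rw [aLoop_eq s.length s 0 0 [] (by omega) (by omega), List.drop_zero]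
    simp only [hf, Nat.zero_add]
    rw [spec_eq_some hf]
    set u := List.dropWhile isC (s.drop (j + 1)) with hu
    have hsplit : List.dropWhile isC (s.drop j) = u := by
      rw [drop_comma hj hcj, List.dropWhile_cons_of_pos (by decide)]
    have hun : u ≠ [] := by
      intro hue
      have hall : ∀ x ∈ s.drop (j + 1), isC x = true := List.dropWhile_eq_nil_iff.1 (hu ▸ hue)
      have hdca : pvDep (s.drop (j + 1)) = 0 := pvDep_commas' hall
      apply hdepS
      conv_lhs => rw [← List.take_append_drop j s, drop_comma hj hcj]
      rw [pvDep_append, pvDep_cons, hdj0, hdca]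
      simp
    set v := (u.reverse.dropWhile isC).reverse with hv
    set k := pvTC u with hk
    have hdecomp : u = v ++ List.replicate k ',' := rstrip_decomp u
    have hvlast : ∀ c, v.getLast? = some c → isC c = false := fun c hc => rstrip_getLast hc
    have hstrip : PySem.Chars.stripChars (s.drop j) [','] = v := by
      rw [stripChars_eq, hsplit, hv]
    have hku : u.getLast? = s.getLast? := getLast?_of_suffix (w_suffix j s) hun
    have hkpos : 0 < k := by
      rw [hk]
      exact tc_pos (by rw [hku, hlastS])
    have hvne : v ≠ [] := by
      intro hve
      have hrep : u = List.replicate k ',' := by rw [hdecomp, hve]; simp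
      have hhead : u.head? = some ',' := by
        rw [hrep, List.head?_replicate, if_neg (by omega)]
      have hh := head?_dropWhile_false (p := isC) (l := s.drop (j + 1)) (by rw [← hu]; exact hhead)
      simp [isC] at hh
    have hdepv : pvDep v ≠ 0 := by
      intro hv0
      apply hdepS
      conv_lhs => rw [← List.take_append_drop j s, drop_comma hj hcj]
      conv_lhs => rw [← List.takeWhile_append_dropWhile (p := isC) (l := s.drop (j + 1)), ← hu]
      rw [hdecomp, pvDep_append, pvDep_cons, hdj0,
        pvDep_append, pvDep_commas' (fun c hc => List.mem_takeWhile_imp hc),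
        pvDep_append, hv0,
        pvDep_commas' (fun c hc => by
          have hcc := List.eq_of_mem_replicate hc
          simp [isC, hcc])]
      simp
    rw [hstrip, List.nil_append,
      aK v.length v 0 [s.take j] (le_refl _) (fun _ => rfl) hvlast (fun h => absurd h (by omega))]
    rw [show v ++ List.replicate 0 ',' = v by simp, hsplit, hdecomp]
    intro hcontra
    simp only [List.cons_append, List.nil_append] at hcontra
    rw [List.cons_eq_cons] at hcontra
    exact specT v.length v k (le_refl _) hkpos hdepv hvlast hcontra.2

theorem ofList_injective : Function.Injective String.ofList := fun a b h => by
  have h2 := congrArg String.toList h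
  simpa using h2

-- ===== VERDICT (by name: the statement is the Claim_ definition above) =====
theorem getListItems_spec : Claim_unchanged_getListItems := by
  intro expr _ hD
  have hD' : ¬ DL ((expr.toList.drop 1).dropLast) := by
    intro hdl
    exact hD (by simpa [D_getListItems, DL] using hdl)
  unfold getListItems getListItems_alt
  rw [slice_inner, bGo_spec _ [], List.nil_append, main_lemma _ hD']

theorem getListItems_changed : Claim_changed_getListItems := by
  unfold Claim_changed_getListItems
  refine ⟨by decide, by decide, ?_, by decide, by decide⟩
  show getListItems "[a,[b,]" = ["a", "[b"]
  unfold getListItems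
  rw [slice_inner, show (("[a,[b,]" : String).toList.drop 1).dropLast = ['a', ',', '[', 'b', ','] from by decide]
  rw [aLoop_eq 5 ['a', ',', '[', 'b', ','] 0 0 [] (by simp) (by simp)]
  simp only [List.drop_zero, show findTop ['a', ',', '[', 'b', ','] 0 = some 1 from by decide]
  rw [show PySem.Chars.stripChars (List.drop 1 ['a', ',', '[', 'b', ',']) [','] = ['[', 'b'] from by decide]
  rw [aLoop_eq 2 ['[', 'b'] 0 0 _ (by simp) (by simp)]
  simp only [List.drop_zero, show findTop ['[', 'b'] 0 = none from by decide]
  decide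

theorem getListItems_tight : Claim_exact_getListItems := by
  intro expr _ hD
  have hDL : DL ((expr.toList.drop 1).dropLast) := by simpa [D_getListItems, DL] using hD
  unfold getListItems getListItems_alt
  rw [slice_inner]
  intro h
  exact main_ne _ hDL (by
    have h2 := List.map_injective_iff.2 ofList_injective h
    rw [bGo_spec _ [], List.nil_append] at h2
    exact h2)
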